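-- pv_equiv track=rewrite | github.com/Lala-chick/problem-solving | 0809/이진삼진탐색놀이.py | max_tern
-- ===== SOURCE A (Python) =====
-- def max_tern(N):
--     if N == 1:
--         return 0
--     elif N == 2:
--         return 1
--     else:
--         i = 2
--         n = 1
--         tmp = 2
--         while True:
--             tmp += 3**n
--             if N <= tmp:
--                 return i
--             n += i%2
--             i += 1
-- ===== SOURCE B (Python) =====
-- def max_tern(N):
--     if N == 1:
--         return 0
--     elif N == 2:
--         return 1
--     else:
--         p = 1
--         while 3 ** (p + 1) - 1 < N:
--             p += 1
--         return 2 * p if 2 * 3 ** p - 1 >= N else 2 * p + 1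
-- ===== Notes on version B (the rewrite author's own statement) =====
-- stated objective: simpler
-- what changed: Replaces the step-by-step accumulator loop (running sum tmp, parity-driven exponent n, index i) with a single loop that finds the smallest level p with 3^(p+1)-1 >= N and then picks 2p or 2p+1 by one closed-form threshold 2*3^p-1, with no running sum or counters.
import Mathlib
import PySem

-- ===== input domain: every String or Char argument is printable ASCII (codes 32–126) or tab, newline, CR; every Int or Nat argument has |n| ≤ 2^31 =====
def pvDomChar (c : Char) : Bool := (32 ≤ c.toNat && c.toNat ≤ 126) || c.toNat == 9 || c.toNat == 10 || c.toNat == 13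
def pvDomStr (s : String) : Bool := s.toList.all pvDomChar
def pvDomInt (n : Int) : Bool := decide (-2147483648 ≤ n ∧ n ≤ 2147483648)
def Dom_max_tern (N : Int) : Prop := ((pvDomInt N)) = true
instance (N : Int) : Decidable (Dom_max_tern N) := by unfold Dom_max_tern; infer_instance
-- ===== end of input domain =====

-- B replaces A's accumulator loop by a level search plus a single closed-form threshold test (objective: simpler).

-- ===== PORT A =====
-- A's while-True loop: state (i, n, tmp); i and n stay ≥ 0 throughout (i starts at 2,
-- n at 1, both only ever incremented), so they are carried as Nat (i%2 on Nat agrees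
-- with Python's % for nonnegative values); tmp and N stay Int.
def max_tern_loopA (N : Int) (i n : Nat) (tmp : Int) : Int :=
  let tmp' := tmp + 3 ^ n
  if N ≤ tmp' then (i : Int)
  else max_tern_loopA N (i + 1) (n + i % 2) tmp'
termination_by (N - tmp).toNat
decreasing_by
  have h1 : (1 : Int) ≤ 3 ^ n := one_le_pow₀ (by norm_num)
  simp only [Int.not_le] at *
  omega

def max_tern (N : Int) : Int :=
  if N = 1 then 0
  else if N = 2 then 1
  else max_tern_loopA N 2 1 2

-- ===== PORT B =====
def max_tern_loopB (N : Int) (p : Nat) : Nat :=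
  if (3 : Int) ^ (p + 1) - 1 < N then max_tern_loopB N (p + 1)
  else p
termination_by (N + 1 - 3 ^ (p + 1)).toNat
decreasing_by
  have h1 : (1 : Int) ≤ 3 ^ (p + 1) := one_le_pow₀ (by norm_num)
  have h2 : (3 : Int) ^ (p + 1 + 1) = 3 * 3 ^ (p + 1) := by ring
  simp only [Int.not_le] at *
  omega

def max_tern_finishB (N : Int) (p : Nat) : Int :=
  if 2 * 3 ^ p - 1 ≥ N then 2 * (p : Int) else 2 * (p : Int) + 1

def max_tern_alt (N : Int) : Int :=
  if N = 1 then 0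
  else if N = 2 then 1
  else max_tern_finishB N (max_tern_loopB N 1)

-- ===== PRECONDITION & SPEC =====
def Spec_max_tern (N : Int) (out : Int) : Prop := out = max_tern_alt N
instance (N : Int) (out : Int) : Decidable (Spec_max_tern N out) := by unfold Spec_max_tern; infer_instance

-- ===== CLAIM (what is proved, stated in full; the proofs are below) =====
def Claim_equal_max_tern : Prop := ∀ (N : Int), Dom_max_tern N → Spec_max_tern N (max_tern N)

-- ===== LEMMAS AND PROOFS =====

-- A's loop entered at level p (i = 2p, n = p, tmp = 3^p - 1) computes exactly B's
-- "find the level, then threshold" answer from level p on.  d bounds N - p to found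
-- the induction.
theorem max_tern_key (d : Nat) : ∀ (N : Int) (p : Nat), 1 ≤ p → N ≤ (p : Int) + d →
    max_tern_loopA N (2 * p) p ((3 : Int) ^ p - 1) = max_tern_finishB N (max_tern_loopB N p) := by
  induction d with
  | zero =>
    intro N p hp hN
    have hpow : (p : Int) < 3 ^ p := by
      exact_mod_cast (Nat.lt_pow_self (by norm_num : 1 < 3) : p < 3 ^ p)
    have h1 : (1 : Int) ≤ 3 ^ p := one_le_pow₀ (by norm_num)
    have hle : N ≤ 2 * 3 ^ p - 1 := by omega
    have hpow1 : (3 : Int) ^ (p + 1) = 3 * 3 ^ p := by ring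
    rw [max_tern_loopA, max_tern_loopB]
    have hA : N ≤ 3 ^ p - 1 + 3 ^ p := by omega
    have hB : ¬ ((3 : Int) ^ (p + 1) - 1 < N) := by omega
    simp only [hA, if_pos, hB, if_neg, not_false_iff]
    unfold max_tern_finishB
    rw [if_pos (by omega)]
    push_cast; ring
  | succ d ih =>
    intro N p hp hN
    have h1 : (1 : Int) ≤ 3 ^ p := one_le_pow₀ (by norm_num)
    have hpow1 : (3 : Int) ^ (p + 1) = 3 * 3 ^ p := by ring
    by_cases hle : N ≤ 2 * 3 ^ p - 1
    · rw [max_tern_loopA, max_tern_loopB]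
      have hA : N ≤ 3 ^ p - 1 + 3 ^ p := by omega
      have hB : ¬ ((3 : Int) ^ (p + 1) - 1 < N) := by omega
      simp only [hA, if_pos, hB, if_neg, not_false_iff]
      unfold max_tern_finishB
      rw [if_pos (by omega)]
      push_cast; ring
    · by_cases hle2 : N ≤ 3 ^ (p + 1) - 1
      · -- A returns 2p+1 after the second iteration; B stops at level p, odd branch
        rw [max_tern_loopA]
        have hA1 : ¬ (N ≤ 3 ^ p - 1 + 3 ^ p) := by omega
        rw [if_neg hA1]
        have hmod : (2 * p) % 2 = 0 := Nat.mul_mod_right 2 p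
        rw [max_tern_loopA]
        simp only [hmod, Nat.add_zero]
        rw [if_pos (by omega)]
        rw [max_tern_loopB, if_neg (by omega)]
        unfold max_tern_finishB
        rw [if_neg (by omega)]
        push_cast; ring
      · -- both recurse to level p+1
        rw [max_tern_loopA]
        have hA1 : ¬ (N ≤ 3 ^ p - 1 + 3 ^ p) := by omega
        rw [if_neg hA1]
        have hmod : (2 * p) % 2 = 0 := Nat.mul_mod_right 2 p
        rw [max_tern_loopA]
        simp only [hmod, Nat.add_zero]
        rw [if_neg (by omega)]
        have hmod2 : (2 * p + 1) % 2 = 1 := by omega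
        rw [max_tern_loopB, if_pos (by omega)]
        have harg1 : 2 * p + 1 + 1 = 2 * (p + 1) := by omega
        have harg2 : p + (2 * p + 1) % 2 = p + 1 := by omega
        have harg3 : (3 : Int) ^ p - 1 + 3 ^ p + 3 ^ p = 3 ^ (p + 1) - 1 := by
          rw [hpow1]; ring
        rw [harg1, harg2, harg3]
        apply ih N (p + 1) (by omega)
        have hplt : ((p : Int)) < 3 ^ (p + 1) := by
          have : (p : Int) < 3 ^ p := by
            exact_mod_cast (Nat.lt_pow_self (by norm_num : 1 < 3) : p < 3 ^ p)
          omega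
        omega

-- ===== VERDICT (by name: the statement is the Claim_ definition above) =====
theorem max_tern_spec : Claim_equal_max_tern := by
  intro N _
  unfold Spec_max_tern max_tern max_tern_alt
  by_cases h1 : N = 1
  · simp [h1]
  · by_cases h2 : N = 2
    · simp [h2]
    · rw [if_neg h1, if_neg h2, if_neg h1, if_neg h2]
      have := max_tern_key N.toNat N 1 (le_refl 1) (by omega)
      simpa using this
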